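-- pv_equiv track=rewrite | github.com/maskhuang/CompGen | workflow/lib/bio_utils.py | compute_length_histogram
-- ===== SOURCE A (Python) =====
-- from typing import Optional
--
-- def compute_length_histogram(
--     lengths: list[int],
--     bins: Optional[list[int]] = None
-- ) -> dict[str, list]:
--     """
--     Compute length distribution histogram.
--
--     Args:
--         lengths: List of sequence lengths.
--         bins: Bin edges (default: [0, 100, 200, 500, 1000, 2000, 5000, 10000, inf]).
--
--     Returns:
--         Dict with 'bins' and 'counts' lists.
--     """
--     if bins is None:
--         bins = [0, 100, 200, 500, 1000, 2000, 5000, 10000]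
--
--     # Add infinity as last bin edge
--     bin_edges = bins + [float('inf')]
--     counts = [0] * (len(bin_edges) - 1)
--
--     for length in lengths:
--         for i in range(len(bin_edges) - 1):
--             if bin_edges[i] <= length < bin_edges[i + 1]:
--                 counts[i] += 1
--                 break
--
--     return {
--         "bins": bins,
--         "counts": counts
--     }
-- ===== SOURCE B (Python) =====
-- from typing import Optional
--
-- def compute_length_histogram(
--     lengths: list[int],
--     bins: Optional[list[int]] = None
-- ) -> dict[str, list]:
--     if bins is None:
--         bins = [0, 100, 200, 500, 1000, 2000, 5000, 10000]
--     edges = bins + [float('inf')]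
--     counts = []
--     remaining = lengths
--     for lo, hi in zip(edges, edges[1:]):
--         counts.append(len([x for x in remaining if lo <= x < hi]))
--         remaining = [x for x in remaining if not (lo <= x < hi)]
--     return {"bins": bins, "counts": counts}
-- ===== Notes on version B (the rewrite author's own statement) =====
-- stated objective: alternative
-- what changed: B inverts the loop nesting: it sweeps bin intervals outermost, at each interval counting the captured lengths and removing them from a shrinking working list (a sieve), instead of A's per-length inner scan over bin edges that increments a counts array with break.
import Mathlib
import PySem

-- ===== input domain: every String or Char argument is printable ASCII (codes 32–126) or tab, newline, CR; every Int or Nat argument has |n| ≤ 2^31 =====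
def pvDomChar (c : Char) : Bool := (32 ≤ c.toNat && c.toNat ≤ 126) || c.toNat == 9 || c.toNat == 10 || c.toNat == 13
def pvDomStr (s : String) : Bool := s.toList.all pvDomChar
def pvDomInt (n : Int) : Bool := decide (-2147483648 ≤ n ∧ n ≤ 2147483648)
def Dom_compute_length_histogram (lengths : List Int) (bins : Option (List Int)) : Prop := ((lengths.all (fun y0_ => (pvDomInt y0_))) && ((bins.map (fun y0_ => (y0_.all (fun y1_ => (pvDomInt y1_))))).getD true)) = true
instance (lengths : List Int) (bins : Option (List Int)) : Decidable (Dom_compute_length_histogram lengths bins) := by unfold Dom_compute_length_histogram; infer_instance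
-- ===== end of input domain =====

-- B inverts the loop nesting: it sweeps bin intervals outermost, counting and removing the
-- captured lengths from a shrinking working list (a sieve), instead of A's per-length inner
-- scan over the bin edges incrementing a counts array (objective: alternative).

-- ===== PORT A =====
-- A's inner loop over bin_edges = bins + [inf] with break: structural scan over the edge list;
-- the one-element case is the last pair (bins[-1], inf), where 'length < inf' is always true for an int.
def aScan : List Int → Int → Option Nat
  | [], _ => none
  | [e], L => if e ≤ L then some 0 else none
  | e :: e' :: rest, L =>
      if e ≤ L ∧ L < e' then some 0 else (aScan (e' :: rest) L).map (· + 1)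

def compute_length_histogram (lengths : List Int) (bins : Option (List Int)) : List (String × List Int) :=
  let bins := bins.getD [0, 100, 200, 500, 1000, 2000, 5000, 10000]
  let counts0 : List Int := List.replicate bins.length 0
  let counts := lengths.foldl (fun c L =>
      match aScan bins L with
      | some i => c.set i (c.getD i 0 + 1)   -- counts[i] += 1 (i is always in range); then break
      | none => c) counts0
  [("bins", bins), ("counts", counts)]

-- ===== PORT B =====
-- B's loop 'for lo, hi in zip(edges, edges[1:])' with edges = bins + [inf]: structural recursion
-- over the edge list carrying the shrinking 'remaining'; in the last pair hi = inf, so 'x < hi'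
-- is always true for an int and only 'lo ≤ x' is tested.
def bSieve : List Int → List Int → List Int
  | [], _ => []
  | [e], rem => [((rem.filter (fun x => e ≤ x)).length : Int)]
  | e :: e' :: rest, rem =>
      ((rem.filter (fun x => e ≤ x ∧ x < e')).length : Int) ::
        bSieve (e' :: rest) (rem.filter (fun x => ¬ (e ≤ x ∧ x < e')))

def compute_length_histogram_alt (lengths : List Int) (bins : Option (List Int)) : List (String × List Int) :=
  let bins := bins.getD [0, 100, 200, 500, 1000, 2000, 5000, 10000]
  [("bins", bins), ("counts", bSieve bins lengths)]

-- ===== PRECONDITION & SPEC =====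
def Spec_compute_length_histogram (lengths : List Int) (bins : Option (List Int)) (out : List (String × List Int)) : Prop := out = compute_length_histogram_alt lengths bins
instance (lengths : List Int) (bins : Option (List Int)) (out : List (String × List Int)) : Decidable (Spec_compute_length_histogram lengths bins out) := by unfold Spec_compute_length_histogram; infer_instance

-- ===== CLAIM (what is proved, stated in full; the proofs are below) =====
def Claim_equal_compute_length_histogram : Prop := ∀ (lengths : List Int) (bins : Option (List Int)), Dom_compute_length_histogram lengths bins → Spec_compute_length_histogram lengths bins (compute_length_histogram lengths bins)

-- ===== LEMMAS AND PROOFS =====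

theorem aScan_lt (bins : List Int) (L : Int) (i : Nat) (h : aScan bins L = some i) :
    i < bins.length := by
  induction bins generalizing i with
  | nil => simp [aScan] at h
  | cons e rest ih =>
    cases rest with
    | nil =>
      rw [aScan] at h
      split at h
      · injection h with h; subst h; simp
      · exact absurd h (by simp)
    | cons e' rest' =>
      rw [aScan] at h
      split at h
      · injection h with h; subst h; simp
      · simp only [Option.map_eq_some_iff] at h
        obtain ⟨j, hj, rfl⟩ := h
        have := ih j hj
        simp at this ⊢; omega

theorem foldl_step_length (bins : List Int) (ls : List Int) (c : List Int) :
    (ls.foldl (fun c L =>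
      match aScan bins L with
      | some i => c.set i (c.getD i 0 + 1)
      | none => c) c).length = c.length := by
  induction ls generalizing c with
  | nil => rfl
  | cons x ls ih =>
    rw [List.foldl_cons, ih]
    cases aScan bins x <;> simp

-- the foldl of unit increments, read pointwise, is a count over the mapped bin indices:
-- the traversal order of A's outer loop does not matter
theorem foldl_step_getD (bins : List Int) (ls : List Int) (c : List Int)
    (hc : c.length = bins.length) (j : Nat) (hj : j < bins.length) :
    (ls.foldl (fun c L =>
      match aScan bins L with
      | some i => c.set i (c.getD i 0 + 1)
      | none => c) c).getD j 0
      = c.getD j 0 + ((ls.map (aScan bins)).count (some j) : Int) := by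
  induction ls generalizing c with
  | nil => simp
  | cons x ls ih =>
    rw [List.foldl_cons, List.map_cons, List.count_cons]
    cases hax : aScan bins x with
    | none =>
      rw [ih c hc]
      simp
    | some i =>
      have hi : i < bins.length := aScan_lt bins x i hax
      rw [ih _ (by rw [List.length_set]; exact hc)]
      by_cases hij : i = j
      · subst hij
        have : (c.set i (c.getD i 0 + 1)).getD i 0 = c.getD i 0 + 1 := by
          rw [List.getD_eq_getElem _ _ (by rw [List.length_set]; omega : i < (c.set i _).length)]
          simp [List.getElem_set_self, hc ▸ hi]
        rw [this]
        simp
        ring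
      · have : (c.set i (c.getD i 0 + 1)).getD j 0 = c.getD j 0 := by
          simp [List.getD_eq_getElem?_getD, hij]
        rw [this]
        simp [hij]

-- the count captured by B's head interval is the count of first-match index 0
theorem count_head (e e' : Int) (rest rem : List Int) :
    (rem.map (aScan (e :: e' :: rest))).count (some 0)
      = (rem.filter (fun x => e ≤ x ∧ x < e')).length := by
  induction rem with
  | nil => simp
  | cons x rem ih =>
    rw [List.map_cons, List.count_cons, List.filter_cons]
    by_cases hx : e ≤ x ∧ x < e'
    · have : aScan (e :: e' :: rest) x = some 0 := by rw [aScan, if_pos hx]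
      simp [this, hx, ih]
    · have : aScan (e :: e' :: rest) x = (aScan (e' :: rest) x).map (· + 1) := by
        rw [aScan, if_neg hx]
      have hne : ¬ ((aScan (e' :: rest) x).map (· + 1) = some 0) := by
        cases aScan (e' :: rest) x <;> simp
      simp [this, hx, hne, ih]

-- the count captured by B's last interval [e, inf) is the count of first-match index 0
theorem count_last (e : Int) (rem : List Int) :
    (rem.map (aScan [e])).count (some 0)
      = (rem.filter (fun x => e ≤ x)).length := by
  induction rem with
  | nil => simp
  | cons x rem ih =>
    rw [List.map_cons, List.count_cons, List.filter_cons]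
    by_cases hx : e ≤ x
    · have : aScan [e] x = some 0 := by rw [aScan, if_pos hx]
      simp [this, hx, ih]
    · have : aScan [e] x = none := by rw [aScan, if_neg hx]
      simp [this, hx, ih]

-- removing the head interval's captures shifts first-match indices down by one
theorem count_shift (e e' : Int) (rest rem : List Int) (i : Nat) :
    (rem.map (aScan (e :: e' :: rest))).count (some (i + 1))
      = (((rem.filter (fun x => ¬ (e ≤ x ∧ x < e'))).map (aScan (e' :: rest))).count (some i)) := by
  induction rem with
  | nil => simp
  | cons x rem ih =>
    rw [List.map_cons, List.count_cons, List.filter_cons]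
    by_cases hx : e ≤ x ∧ x < e'
    · have : aScan (e :: e' :: rest) x = some 0 := by rw [aScan, if_pos hx]
      simp [this, hx, ih]
    · have hA : aScan (e :: e' :: rest) x = (aScan (e' :: rest) x).map (· + 1) := by
        rw [aScan, if_neg hx]
      have : ((aScan (e' :: rest) x).map (· + 1) = some (i + 1)) ↔ (aScan (e' :: rest) x = some i) := by
        cases aScan (e' :: rest) x with
        | none => simp
        | some v => simp
      simp only [hA, hx, not_false_iff, ih]
      by_cases hv : aScan (e' :: rest) x = some i
      · simp [hv]
      · have : ¬ ((aScan (e' :: rest) x).map (· + 1) = some (i + 1)) := by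
          intro h; exact hv (this.mp h)
        simp [hv, this]

-- B's sieve computes, per bin index, the count of lengths whose first match is that index
theorem bSieve_eq (bins rem : List Int) :
    bSieve bins rem
      = (List.range bins.length).map
          (fun i => (((rem.map (aScan bins)).count (some i) : Nat) : Int)) := by
  induction bins generalizing rem with
  | nil => simp [bSieve]
  | cons e rest ih =>
    cases rest with
    | nil =>
      rw [bSieve]
      simp [count_last]
    | cons e' rest' =>
      rw [bSieve, ih]
      have hr : List.range (e :: e' :: rest').length
          = 0 :: (List.range (e' :: rest').length).map (· + 1) := by
        simp [List.range_succ_eq_map]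
      rw [hr, List.map_cons, List.map_map]
      congr 1
      · have := count_head e e' rest' rem
        omega
      · apply List.map_congr_left
        intro i _
        simp only [Function.comp]
        rw [count_shift e e' rest' rem i]

theorem main_eq (lengths : List Int) (bins : Option (List Int)) :
    compute_length_histogram lengths bins = compute_length_histogram_alt lengths bins := by
  unfold compute_length_histogram compute_length_histogram_alt
  set b := bins.getD [0, 100, 200, 500, 1000, 2000, 5000, 10000] with hb
  simp only [List.cons.injEq, Prod.mk.injEq, and_true, true_and]
  rw [bSieve_eq]
  apply List.ext_getElem
  · rw [foldl_step_length]
    simp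
  · intro j h1 h2
    have hj : j < b.length := by
      have h1' := h1
      rw [foldl_step_length] at h1'
      simpa using h1'
    have hgd := foldl_step_getD b lengths (List.replicate b.length 0) (by simp) j hj
    rw [List.getD_eq_getElem _ _ h1] at hgd
    simp only [List.getElem_map, List.getElem_range]
    rw [hgd]
    simp

-- ===== VERDICT (by name: the statement is the Claim_ definition above) =====
theorem compute_length_histogram_spec : Claim_equal_compute_length_histogram := by
  intro lengths bins _
  unfold Spec_compute_length_histogram
  exact main_eq lengths bins
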